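-- pv_equiv track=rewrite | github.com/TAEKnical/Algorithm | programmers/fruitseller.py | solution
-- ===== SOURCE A (Python) =====
-- from collections import deque
--
-- def solution(k, m, score):
--     answer = 0
--
--     count = len(score) // m
--     boxes = [[] for _ in range(count)]
--     score = deque(sorted(score, reverse=True))
--
--     while (len(score) >= m):
--         box = [score.popleft() for _ in range(m)]
--         answer += (min(box) * m)
--
--     return answer
-- ===== SOURCE B (Python) =====
-- def solution(k, m, score):
--     s = sorted(score)
--     n = len(s)
--     return m * sum(s[n - (j + 1) * m] for j in range(n // m))
-- ===== Notes on version B (the rewrite author's own statement) =====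
-- stated objective: simpler
-- what changed: Replaces A's deque/while loop that pops each group of m and takes its min with a single ascending sort plus direct index arithmetic: the minimum of the j-th best group is s[n-(j+1)*m], summed over j in range(n//m).
import Mathlib
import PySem

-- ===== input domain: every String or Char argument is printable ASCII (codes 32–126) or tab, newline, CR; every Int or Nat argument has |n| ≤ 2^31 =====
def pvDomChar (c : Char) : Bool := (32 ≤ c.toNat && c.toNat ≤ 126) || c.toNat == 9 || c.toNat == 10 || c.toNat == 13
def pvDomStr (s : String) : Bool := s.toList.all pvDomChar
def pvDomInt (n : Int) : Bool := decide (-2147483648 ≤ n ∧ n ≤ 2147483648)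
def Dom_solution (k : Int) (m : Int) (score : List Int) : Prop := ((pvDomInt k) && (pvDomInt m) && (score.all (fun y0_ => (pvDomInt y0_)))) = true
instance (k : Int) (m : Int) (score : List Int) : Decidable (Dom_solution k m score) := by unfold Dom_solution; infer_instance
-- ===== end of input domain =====

-- B replaces A's deque/while grouping loop with one ascending sort and index arithmetic (simpler, same asymptotic cost).


-- ===== PORT A =====
-- the while loop: pop m elements from the front, add min(box)*m; the 'm ≤ 0' guard only
-- makes the recursion total — Pre_solution (1 ≤ m) excludes it (Python raises there).
def solutionWhile (m : Int) (score : List Int) (answer : Int) : Int :=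
  if m ≤ 0 then answer
  else if h : (score.length : Int) ≥ m then
    let box := score.take m.toNat
    solutionWhile m (score.drop m.toNat) (answer + ((PySem.List.min? box (fun x => x)).getD 0) * m)
  else answer
termination_by score.length
decreasing_by
  simp only [List.length_drop]
  omega

def solution (k : Int) (m : Int) (score : List Int) : Int :=
  -- count/boxes are built by A but never used; 'count' kept literally, 'boxes' is dead data
  let _count := PySem.Int.floordiv (score.length : Int) m
  let scoreD := PySem.List.sorted score (fun x => x) true
  solutionWhile m scoreD 0

-- ===== PORT B =====
def solution_alt (k : Int) (m : Int) (score : List Int) : Int :=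
  let s := PySem.List.sorted score (fun x => x) false
  let n : Int := s.length
  m * ((PySem.List.pyRange 0 (PySem.Int.floordiv n m) 1).map
        (fun j => PySem.List.pyGetD s (n - (j + 1) * m) 0)).sum

-- ===== PRECONDITION & SPEC =====
-- Pre_ excludes m ≤ 0: Python A raises there (ZeroDivisionError at m = 0, ValueError min([]) for m < 0).
def Pre_solution (k : Int) (m : Int) (score : List Int) : Prop := 1 ≤ m
instance (k : Int) (m : Int) (score : List Int) : Decidable (Pre_solution k m score) := by unfold Pre_solution; infer_instance
def pvWitness_solution : Int × Int × List Int := (4, 2, [1, 5, 2, 4, 3])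

def Spec_solution (k : Int) (m : Int) (score : List Int) (out : Int) : Prop := out = solution_alt k m score
instance (k : Int) (m : Int) (score : List Int) (out : Int) : Decidable (Spec_solution k m score out) := by unfold Spec_solution; infer_instance

-- ===== CLAIM (what is proved, stated in full; the proofs are below) =====
def Claim_equal_solution : Prop := ∀ (k : Int) (m : Int) (score : List Int), Dom_solution k m score → Pre_solution k m score → Spec_solution k m score (solution k m score)

-- ===== LEMMAS AND PROOFS =====

-- reference value: m * Σ_{j < n/m} d[(j+1)m - 1], over the DESCENDING list d
def refSum (m : Nat) (d : List Int) : Int :=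
  (m : Int) * ∑ j ∈ Finset.range (d.length / m), d.getD ((j + 1) * m - 1) 0

-- min of a nonempty weakly-descending list is its last element
lemma min_desc (t : List Int) (ht : t ≠ []) (hp : t.Pairwise (· ≥ ·)) :
    (PySem.List.min? t (fun x => x)).getD 0 = t.getLast ht := by
  obtain ⟨v, hv⟩ : ∃ v, PySem.List.min? t (fun x => x) = some v := by
    cases hmin : PySem.List.min? t (fun x => x) with
    | none => exact absurd ((PySem.List.min?_eq_none_iff _ _).mp hmin) ht
    | some v => exact ⟨v, rfl⟩
  rw [hv]; simp only [Option.getD_some]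
  have hvmem := PySem.List.min?_mem hv
  have hvmin := PySem.List.min?_isMin hv
  have h1 : v ≤ t.getLast ht := hvmin _ (List.getLast_mem ht)
  have h2 : t.getLast ht ≤ v := by
    -- last element of a weakly descending list is ≤ every member
    have := List.pairwise_iff_getElem.mp hp
    obtain ⟨i, hi, hvi⟩ := List.mem_iff_getElem.mp hvmem
    rw [List.getLast_eq_getElem]
    rcases Nat.lt_or_ge i (t.length - 1) with h | h
    · have := this i (t.length - 1) hi (by omega) h
      rw [hvi] at this; exact this
    · have hieq : i = t.length - 1 := by omega
      subst hieq; rw [hvi]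
  omega

lemma solutionWhile_eq_refSum (m : Nat) (hm : 1 ≤ m) (d : List Int)
    (hp : d.Pairwise (· ≥ ·)) (a : Int) :
    solutionWhile (m : Int) d a = a + refSum m d := by
  induction hN : d.length using Nat.strong_induction_on generalizing d a with
  | _ N ih =>
  subst hN
  rw [solutionWhile]
  rw [if_neg (by omega)]
  by_cases hlen : (d.length : Int) ≥ (m : Int)
  · rw [dif_pos hlen]
    have hmn : m ≤ d.length := by exact_mod_cast hlen
    have hd : (d.drop ((m : Int).toNat)).length < d.length := by
      simp only [List.length_drop, Int.toNat_natCast]; omega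
    have hpd : (d.drop ((m : Int).toNat)).Pairwise (· ≥ ·) := List.Pairwise.drop hp
    rw [ih _ hd _ hpd _ rfl]
    simp only [Int.toNat_natCast] at *
    have hbne : d.take m ≠ [] := by
      intro h; have := congrArg List.length h
      simp only [List.length_take, List.length_nil] at this; omega
    rw [min_desc _ hbne (List.Pairwise.take hp)]
    have hlast : (d.take m).getLast hbne = d.getD (m - 1) 0 := by
      rw [List.getLast_eq_getElem, List.getD_eq_getElem _ _ (by omega)]
      rw [List.getElem_take]
      congr 1
      simp only [List.length_take]; omega
    rw [hlast]
    unfold refSum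
    simp only [List.length_drop]
    rw [show d.length / m = (d.length - m) / m + 1 from Nat.div_eq_sub_div (by omega) hmn]
    rw [Finset.sum_range_succ']
    have hshift : ∀ j, j ∈ Finset.range ((d.length - m) / m) →
        (d.drop m).getD ((j + 1) * m - 1) 0 = d.getD ((j + 1 + 1) * m - 1) 0 := by
      intro j hj
      have hjlt := Finset.mem_range.mp hj
      have hle : (j + 1) * m ≤ d.length - m := by
        calc (j + 1) * m ≤ ((d.length - m) / m) * m := Nat.mul_le_mul_right _ (by omega)
        _ ≤ d.length - m := Nat.div_mul_le_self _ _
      have hpos : 0 < (j + 1) * m := Nat.mul_pos (by omega) (by omega)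
      rw [List.getD_eq_getElem _ _ (by simp only [List.length_drop]; omega),
          List.getD_eq_getElem _ _ (by
            have : (j + 1 + 1) * m = (j + 1) * m + m := by ring
            omega)]
      rw [List.getElem_drop]
      congr 1
      have : (j + 1 + 1) * m = (j + 1) * m + m := by ring
      omega
    rw [Finset.sum_congr rfl hshift]
    simp only [zero_add, one_mul]
    ring
  · rw [dif_neg hlen]
    unfold refSum
    have : d.length / m = 0 := Nat.div_eq_of_lt (by omega)
    rw [this]
    simp

-- B unfolds to refSum of the reverse of the ascending sort
lemma alt_eq_refSum (k m : Int) (hm : 1 ≤ m) (score : List Int) :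
    solution_alt k m score = refSum m.toNat ((PySem.List.sorted score (fun x => x) false).reverse) := by
  unfold solution_alt refSum
  set s := PySem.List.sorted score (fun x => x) false with hs
  obtain ⟨mN, rfl⟩ : ∃ mN : Nat, m = (mN : Int) := ⟨m.toNat, (Int.toNat_of_nonneg (by omega)).symm⟩
  have hmN : 1 ≤ mN := by exact_mod_cast hm
  simp only [Int.toNat_natCast, List.length_reverse]
  rw [show ((s.length : Int)) = ((s.length : Nat) : Int) from rfl, PySem.Int.floordiv_natCast]
  set nN := s.length with hn
  rw [PySem.List.pyRange_one]
  simp only [Int.sub_zero, Int.toNat_natCast, zero_add, List.map_map]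
  rw [show (List.map ((fun j => PySem.List.pyGetD s (↑nN - (j + 1) * ↑mN) 0) ∘ fun k : Nat => (k : Int)) (List.range (nN / mN))).sum
      = ∑ x ∈ Finset.range (nN / mN), PySem.List.pyGetD s (↑nN - ((x : Int) + 1) * ↑mN) 0 from rfl]
  congr 1
  refine Finset.sum_congr rfl (fun x hx => ?_)
  have hxlt : x < nN / mN := Finset.mem_range.mp hx
  have hle : (x + 1) * mN ≤ nN := by
    calc (x + 1) * mN ≤ (nN / mN) * mN := Nat.mul_le_mul_right _ (by omega)
    _ ≤ nN := Nat.div_mul_le_self _ _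
  have hpos : 0 < (x + 1) * mN := Nat.mul_pos (by omega) (by omega)
  have hidx : (↑nN - ((x : Int) + 1) * ↑mN) = (((nN - (x + 1) * mN : Nat)) : Int) := by
    push_cast [hle]; ring
  rw [hidx, PySem.List.pyGetD_natCast]
  rw [List.getD_eq_getElem _ _ (by omega), List.getD_eq_getElem _ _ (by simp only [List.length_reverse]; omega)]
  rw [List.getElem_reverse]
  congr 1
  omega

-- sorted descending = reverse of sorted ascending (values; Int, identity key)
lemma sorted_rev_eq_reverse (score : List Int) :
    PySem.List.sorted score (fun x => x) true = (PySem.List.sorted score (fun x => x) false).reverse := by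
  have h1 := PySem.List.sorted_perm score (fun x => x) true
  have h2 : ((PySem.List.sorted score (fun x => x) false).reverse).Perm score :=
    (List.reverse_perm _).trans (PySem.List.sorted_perm score (fun x => x) false)
  refine (h1.trans h2.symm).eq_of_pairwise (le := fun (a b : Int) => b ≤ a)
    (fun a b _ _ hab hba => le_antisymm hba hab) ?_ ?_
  · exact PySem.List.sorted_pairwise_rev score (fun x => x)
  · rw [List.pairwise_reverse]
    exact PySem.List.sorted_pairwise score (fun x => x)

-- ===== VERDICT (by name: the statement is the Claim_ definition above) =====
theorem solution_spec : Claim_equal_solution := by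
  intro k m score _ hpre
  unfold Spec_solution solution
  have hm : 1 ≤ m := hpre
  rw [sorted_rev_eq_reverse, alt_eq_refSum k m hm]
  have hp : ((PySem.List.sorted score (fun x => x) false).reverse).Pairwise (· ≥ ·) := by
    rw [List.pairwise_reverse]
    exact (PySem.List.sorted_pairwise score (fun x => x)).imp (fun h => h)
  have := solutionWhile_eq_refSum m.toNat (by omega) _ hp 0
  rw [Int.toNat_of_nonneg (by omega)] at this
  rw [this, zero_add]
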